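-- pv_equiv track=rewrite | github.com/ofd1/extract-data-pdfs | app/classifier.py | identificar_contas_analiticas
-- ===== SOURCE A (Python) =====
-- def identificar_contas_analiticas(rows: list[dict]) -> list[int]:
--     """Return indices of rows that are analytical (leaf-level) accounts.
--
--     A row is analytical if:
--       (a) Its Mascara_Contabil is NOT a prefix of any other mask in the set, OR
--       (b) It has no Mascara_Contabil (empty) — considered analytical by default.
--     """
--     masks: set[str] = {
--         r["Mascara_Contabil"].strip()
--         for r in rows
--         if r.get("Mascara_Contabil", "").strip()
--     }
--
--     indices: list[int] = []
--     for i, row in enumerate(rows):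
--         mascara = str(row.get("Mascara_Contabil", "")).strip()
--         if not mascara:
--             # No mask → analytical by default
--             indices.append(i)
--             continue
--         # Check if any other mask starts with mascara + "."
--         is_parent = any(m.startswith(mascara + ".") for m in masks if m != mascara)
--         if not is_parent:
--             indices.append(i)
--
--     return indices
-- ===== SOURCE B (Python) =====
-- def identificar_contas_analiticas(rows: list[dict]) -> list[int]:
--     # distinct non-empty stripped masks
--     masks = {m for m in (str(r.get("Mascara_Contabil", "")).strip() for r in rows) if m}
--     # every prefix of a mask that ends right before one of its dots ("parent" accounts)
--     parents = {m[:k] for m in masks for k in range(len(m)) if m[k] == "."}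
--     return [
--         i
--         for i, row in enumerate(rows)
--         if (m := str(row.get("Mascara_Contabil", "")).strip()) == "" or m not in parents
--     ]
-- ===== Notes on version B (the rewrite author's own statement) =====
-- stated objective: alternative
-- what changed: B precomputes one set of dot-boundary prefixes (the 'parent' masks, via each mask's dot positions) and emits indices with a single filtering comprehension testing membership in that set, instead of A's per-row any(m.startswith(mascara+'.')) scan over the whole mask set inside an appending loop.
import Mathlib
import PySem

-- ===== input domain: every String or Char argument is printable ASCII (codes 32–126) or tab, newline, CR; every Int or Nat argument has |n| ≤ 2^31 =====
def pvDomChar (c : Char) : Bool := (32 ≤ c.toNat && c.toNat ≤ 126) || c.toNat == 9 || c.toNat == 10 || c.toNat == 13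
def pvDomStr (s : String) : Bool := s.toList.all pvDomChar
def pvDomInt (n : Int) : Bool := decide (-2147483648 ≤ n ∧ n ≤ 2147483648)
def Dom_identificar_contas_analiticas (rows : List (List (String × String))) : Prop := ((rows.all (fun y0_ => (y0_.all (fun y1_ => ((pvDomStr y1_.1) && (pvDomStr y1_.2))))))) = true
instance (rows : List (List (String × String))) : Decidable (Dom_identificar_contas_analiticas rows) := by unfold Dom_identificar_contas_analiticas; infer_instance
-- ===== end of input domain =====

-- B precomputes the set of dot-boundary prefixes ("parent" masks) from each mask's dot
-- positions and emits indices by one filtering comprehension testing membership there,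
-- replacing A's per-row any-startswith scan over the whole mask set.

-- ===== PORT A =====
def identificar_contas_analiticas (rows : List (List (String × String))) : List Int :=
  -- set comprehension building `masks`; under the guard the key is present,
  -- so r["Mascara_Contabil"] equals the getD value used in the guard
  let masks : PySem.Set String := rows.foldl (fun s r =>
      if PySem.Str.strip ((PySem.Dict.mk r).getD "Mascara_Contabil" "") ≠ "" then
        PySem.Set.add s (PySem.Str.strip ((PySem.Dict.mk r).getD "Mascara_Contabil" ""))
      else s) PySem.Set.empty
  (PySem.List.enumerate rows 0).foldl (fun indices p =>
      let mascara := PySem.Str.strip ((PySem.Dict.mk p.2).getD "Mascara_Contabil" "")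
      if mascara = "" then indices ++ [p.1]
      else
        let is_parent := masks.any (fun m =>
          m ≠ mascara && PySem.Str.startswith m (mascara ++ "."))
        if is_parent then indices else indices ++ [p.1]) []

-- ===== PORT B =====
def identificar_contas_analiticas_alt (rows : List (List (String × String))) : List Int :=
  -- masks = {m for m in (str(r.get(...)).strip() for r in rows) if m}
  let masks : PySem.Set String :=
    PySem.Set.ofList (((rows.map (fun r =>
      PySem.Str.strip ((PySem.Dict.mk r).getD "Mascara_Contabil" ""))).filter (fun m => m != "")))
  -- parents = {m[:k] for m in masks for k in range(len(m)) if m[k] == "."}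
  -- (m[k] == "." is a one-character comparison, ported as the code-point test)
  let parents : PySem.Set String := masks.foldl (fun ps m =>
      (PySem.List.pyRange 0 (PySem.Str.len m) 1).foldl (fun ps k =>
          if PySem.Str.pyGet? m k = some '.' then
            PySem.Set.add ps (PySem.Str.slice m none (some k))
          else ps) ps) PySem.Set.empty
  (PySem.List.enumerate rows 0).filterMap (fun p =>
      if ((PySem.Str.strip ((PySem.Dict.mk p.2).getD "Mascara_Contabil" "") == "")
          || !(parents.contains (PySem.Str.strip ((PySem.Dict.mk p.2).getD "Mascara_Contabil" ""))))
      then some p.1 else none)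

-- ===== PRECONDITION & SPEC =====
def Spec_identificar_contas_analiticas (rows : List (List (String × String))) (out : List Int) : Prop := out = identificar_contas_analiticas_alt rows
instance (rows : List (List (String × String))) (out : List Int) : Decidable (Spec_identificar_contas_analiticas rows out) := by unfold Spec_identificar_contas_analiticas; infer_instance

-- ===== CLAIM (what is proved, stated in full; the proofs are below) =====
def Claim_equal_identificar_contas_analiticas : Prop := ∀ (rows : List (List (String × String))), Dom_identificar_contas_analiticas rows → Spec_identificar_contas_analiticas rows (identificar_contas_analiticas rows)

-- ===== LEMMAS AND PROOFS =====

-- membership in a fold that conditionally adds g r to a set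
theorem pvMemFoldAdd {α : Type} (P : α → Prop) [DecidablePred P] (g : α → String)
    (l : List α) (s0 : PySem.Set String) (x : String) :
    x ∈ l.foldl (fun s r => if P r then PySem.Set.add s (g r) else s) s0 ↔
      x ∈ s0 ∨ ∃ r ∈ l, P r ∧ x = g r := by
  induction l generalizing s0 with
  | nil => simp
  | cons r rs ih =>
    simp only [List.foldl_cons, ih]
    constructor
    · rintro (hs | h)
      · split_ifs at hs with hP
        · rcases (PySem.Set.mem_add _ _ _).1 hs with h | h
          · exact Or.inl h
          · exact Or.inr ⟨r, by simp, hP, h⟩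
        · exact Or.inl hs
      · rcases h with ⟨r', hr', h⟩
        exact Or.inr ⟨r', by simp [hr'], h⟩
    · rintro (hs | ⟨r', hr', hP, hx⟩)
      · refine Or.inl ?_
        split_ifs with h
        · exact (PySem.Set.mem_add _ _ _).2 (Or.inl hs)
        · exact hs
      · rcases List.mem_cons.1 hr' with h | h
        · subst h
          exact Or.inl (by rw [if_pos hP]; exact (PySem.Set.mem_add _ _ _).2 (Or.inr hx))
        · exact Or.inr ⟨r', h, hP, hx⟩

-- the two mask builds have the same members
theorem pvMasks_mem (rows : List (List (String × String))) (x : String) :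
    x ∈ rows.foldl (fun s r =>
        if PySem.Str.strip ((PySem.Dict.mk r).getD "Mascara_Contabil" "") ≠ "" then
          PySem.Set.add s (PySem.Str.strip ((PySem.Dict.mk r).getD "Mascara_Contabil" ""))
        else s) PySem.Set.empty ↔
      x ∈ PySem.Set.ofList (((rows.map (fun r =>
        PySem.Str.strip ((PySem.Dict.mk r).getD "Mascara_Contabil" ""))).filter (fun m => m != ""))) := by
  rw [pvMemFoldAdd (fun r => PySem.Str.strip ((PySem.Dict.mk r).getD "Mascara_Contabil" "") ≠ "")]
  rw [PySem.Set.mem_ofList, List.mem_filter, List.mem_map]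
  constructor
  · rintro (hs | ⟨r, hr, hP, hx⟩)
    · exact absurd hs (by simp [PySem.Set.empty])
    · exact ⟨⟨r, hr, hx.symm⟩, by simpa [hx] using hP⟩
  · rintro ⟨⟨r, hr, hx⟩, hne⟩
    exact Or.inr ⟨r, hr, by simpa [hx] using hne, hx.symm⟩

-- membership in B's `parents` set: a dot-boundary prefix of some mask
theorem pvParents_mem (ms : List String) (s0 : PySem.Set String) (x : String) :
    x ∈ ms.foldl (fun ps m =>
        (PySem.List.pyRange 0 (PySem.Str.len m) 1).foldl (fun ps k =>
            if PySem.Str.pyGet? m k = some '.' then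
              PySem.Set.add ps (PySem.Str.slice m none (some k))
            else ps) ps) s0 ↔
      x ∈ s0 ∨ ∃ m ∈ ms, ∃ u v, m.toList = u ++ '.' :: v ∧ x = String.ofList u := by
  induction ms generalizing s0 with
  | nil => simp
  | cons m rest ih =>
    simp only [List.foldl_cons, ih,
      pvMemFoldAdd (fun k => PySem.Str.pyGet? m k = some '.')
        (fun k => PySem.Str.slice m none (some k))]
    have hdot : (∃ k ∈ PySem.List.pyRange 0 (PySem.Str.len m) 1,
        PySem.Str.pyGet? m k = some '.' ∧ x = PySem.Str.slice m none (some k)) ↔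
        ∃ u v, m.toList = u ++ '.' :: v ∧ x = String.ofList u := by
      constructor
      · rintro ⟨k, hk, hget, hx⟩
        rw [PySem.List.mem_pyRange_one] at hk
        obtain ⟨hk0, hklt⟩ := hk
        obtain ⟨n, rfl⟩ := Int.eq_ofNat_of_zero_le hk0
        have hn : n < m.toList.length := by
          have : PySem.Str.len m = (m.toList.length : Int) := by
            simp [PySem.Str.len_eq]
          omega
        have hget' : m.toList[n]? = some '.' := by
          simpa using hget
        refine ⟨m.toList.take n, m.toList.drop (n + 1), ?_, ?_⟩
        · conv_lhs => rw [← List.take_append_drop n m.toList]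
          rw [List.drop_eq_getElem_cons hn]
          have : m.toList[n] = '.' := by
            have := List.getElem?_eq_getElem hn
            rw [this] at hget'
            exact Option.some.inj hget'
          rw [this]
        · rw [← String.toList_inj, hx]
          simp [PySem.Str.toList_slice, PySem.Chars.slice_eq_listSlice,
            PySem.List.slice_to _ hk0]
      · rintro ⟨u, v, hl, hx⟩
        refine ⟨(u.length : Int), ?_, ?_, ?_⟩
        · rw [PySem.List.mem_pyRange_one]
          have : PySem.Str.len m = (m.toList.length : Int) := by
            simp [PySem.Str.len_eq]
          have : m.toList.length = u.length + 1 + v.length := by simp [hl]; omega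
          constructor
          · omega
          · have hlen : PySem.Str.len m = (m.toList.length : Int) := by
              simp [PySem.Str.len_eq]
            omega
        · have : m.toList[u.length]? = some '.' := by
            rw [hl]
            simp
          simpa using this
        · rw [← String.toList_inj]
          have h0 : (0:Int) ≤ (u.length : Int) := by positivity
          simp only [PySem.Str.toList_slice, PySem.Chars.slice_eq_listSlice,
            PySem.List.slice_to _ h0]
          rw [hl, hx]
          simp
    constructor
    · rintro ((hs | hd) | ⟨m', hm', h⟩)
      · exact Or.inl hs
      · exact Or.inr ⟨m, by simp, hdot.1 hd⟩
      · exact Or.inr ⟨m', by simp [hm'], h⟩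
    · rintro (hs | ⟨m', hm', h⟩)
      · exact Or.inl (Or.inl hs)
      · rcases List.mem_cons.1 hm' with hmm | hmm
        · subst hmm; exact Or.inl (Or.inr (hdot.2 h))
        · exact Or.inr ⟨m', hmm, h⟩

-- A's startswith test, characterised by a list decomposition
theorem pvStartswith_iff (m q : String) :
    PySem.Str.startswith m (q ++ ".") = true ↔
      ∃ v, m.toList = q.toList ++ '.' :: v := by
  rw [PySem.Str.startswith_eq, PySem.Chars.startswith_iff]
  constructor
  · rintro ⟨t, ht⟩
    exact ⟨t, by simpa using ht.symm⟩
  · rintro ⟨v, hv⟩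
    exact ⟨v, by simp [hv]⟩

-- the per-row tests of A and B agree (msA: A's mask set, msB: B's; same members)
theorem pvTest_eq (msA msB : List String) (hm : ∀ y, y ∈ msA ↔ y ∈ msB) (q : String) :
    (msA.any (fun m => m ≠ q && PySem.Str.startswith m (q ++ "."))) =
    PySem.Set.contains (msB.foldl (fun ps m =>
        (PySem.List.pyRange 0 (PySem.Str.len m) 1).foldl (fun ps k =>
            if PySem.Str.pyGet? m k = some '.' then
              PySem.Set.add ps (PySem.Str.slice m none (some k))
            else ps) ps) PySem.Set.empty) q := by
  rw [Bool.eq_iff_iff, List.any_eq_true, PySem.Set.contains_iff, pvParents_mem]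
  constructor
  · rintro ⟨m, hmem, hb⟩
    rw [Bool.and_eq_true] at hb
    rcases (pvStartswith_iff m q).1 hb.2 with ⟨v, hv⟩
    exact Or.inr ⟨m, (hm m).1 hmem, q.toList, v, hv, by rw [← String.toList_inj]; simp⟩
  · rintro (hs | ⟨m, hmem, u, v, hl, hx⟩)
    · exact absurd hs (by simp [PySem.Set.empty])
    · have hu : u = q.toList := by
        have h2 := congrArg String.toList hx
        simp at h2
        exact h2.symm
      subst hu
      refine ⟨m, (hm m).2 hmem, ?_⟩
      rw [Bool.and_eq_true]
      refine ⟨?_, (pvStartswith_iff m q).2 ⟨v, hl⟩⟩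
      simp only [ne_eq, decide_eq_true_eq]
      intro h
      subst h
      have := congrArg List.length hl
      simp at this
-- A's append-if loop equals B's filterMap comprehension when the per-row tests agree
theorem pvLoop {α : Type} (mS : α → String) (tA tB : α → Bool)
    (h : ∀ a, tA a = tB a) (l : List (Int × α)) (acc : List Int) :
    l.foldl (fun indices p =>
        if mS p.2 = "" then indices ++ [p.1]
        else if tA p.2 then indices else indices ++ [p.1]) acc
      = acc ++ l.filterMap (fun p =>
          if ((mS p.2 == "") || !(tB p.2)) then some p.1 else none) := by
  induction l generalizing acc with
  | nil => simp
  | cons p ps ih =>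
    simp only [List.foldl_cons, List.filterMap_cons]
    by_cases he : mS p.2 = ""
    · rw [if_pos he, ih]
      simp [he]
    · rw [if_neg he, ← h p.2]
      cases hb : tA p.2 with
      | true => rw [ih]; simp [he]
      | false => rw [ih]; simp

-- ===== VERDICT (by name: the statement is the Claim_ definition above) =====
theorem identificar_contas_analiticas_spec : Claim_equal_identificar_contas_analiticas := by
  intro rows _
  unfold Spec_identificar_contas_analiticas identificar_contas_analiticas identificar_contas_analiticas_alt
  simp only []
  apply Eq.symm
  rw [pvLoop (fun r => PySem.Str.strip ((PySem.Dict.mk r).getD "Mascara_Contabil" ""))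
      (fun r => (rows.foldl (fun s r =>
          if PySem.Str.strip ((PySem.Dict.mk r).getD "Mascara_Contabil" "") ≠ "" then
            PySem.Set.add s (PySem.Str.strip ((PySem.Dict.mk r).getD "Mascara_Contabil" ""))
          else s) PySem.Set.empty).any (fun m =>
            m ≠ PySem.Str.strip ((PySem.Dict.mk r).getD "Mascara_Contabil" "") &&
            PySem.Str.startswith m (PySem.Str.strip ((PySem.Dict.mk r).getD "Mascara_Contabil" "") ++ ".")))
      (fun r => PySem.Set.contains
        ((PySem.Set.ofList (((rows.map (fun r =>
            PySem.Str.strip ((PySem.Dict.mk r).getD "Mascara_Contabil" ""))).filter (fun m => m != "")))).foldl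
          (fun ps m => (PySem.List.pyRange 0 (PySem.Str.len m) 1).foldl (fun ps k =>
              if PySem.Str.pyGet? m k = some '.' then
                PySem.Set.add ps (PySem.Str.slice m none (some k))
              else ps) ps) PySem.Set.empty)
        (PySem.Str.strip ((PySem.Dict.mk r).getD "Mascara_Contabil" "")))
      (fun r => pvTest_eq _ _ (fun y => pvMasks_mem rows y) _)]
  simp
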